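-- pv_equiv track=rewrite | github.com/shincc6500/CodingTest | 프로그래머스/0/120863. 다항식 더하기/다항식 더하기.py | solution
-- ===== SOURCE A (Python) =====
-- def solution(polynomial):
--     answer = ''
--     counter = 0
--     num = 0
--     tmp = polynomial.replace('+','')
--
--     tmp = tmp.split()
--
--     for i in tmp:
--         if 'x' in i:
--             if len(i) ==1:
--                 counter +=1
--             else:
--                 i = i.replace('x','')
--                 counter += int(i)
--         else:
--             num += int(i)
--
--
--     if counter == 0:
--         answer = f'{num}'
--     elif num == 0:
--         if counter == 1:
--             answer = 'x'
--         else: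
--             answer = f'{counter}x'
--     elif counter == 1:
--         answer = f'x + {num}'
--     else:
--         answer = f'{counter}x + {num}'
--     return answer
-- ===== SOURCE B (Python) =====
-- def _value(term, t):
--     # numeric value of one term at x = t
--     if 'x' in term:
--         coeff = 1 if len(term) == 1 else int(term.replace('x', ''))
--         return coeff * t
--     return int(term)
--
--
-- def _eval(tokens, t):
--     return sum(_value(term, t) for term in tokens)
--
--
-- def solution(polynomial):
--     # Interpolation: the expression is c*x + n, so n = p(0) and c = p(1) - p(0).
--     tokens = polynomial.replace('+', '').split()
--     p0 = _eval(tokens, 0)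
--     p1 = _eval(tokens, 1)
--     c, n = p1 - p0, p0
--     parts = []
--     if c != 0:
--         parts.append('x' if c == 1 else f'{c}x')
--     if n != 0 or c == 0:
--         parts.append(f'{n}')
--     return ' + '.join(parts)
-- ===== Notes on version B (the rewrite author's own statement) =====
-- stated objective: alternative
-- what changed: B recovers the coefficients by interpolation - it evaluates the token list at x=0 and x=1 with one uniform term evaluator and sets n=p(0), c=p(1)-p(0) - instead of A's classifying loop that accumulates a coefficient counter and a constant separately, and it formats via a parts-list join instead of A's four-way branch cascade.
import Mathlib
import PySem

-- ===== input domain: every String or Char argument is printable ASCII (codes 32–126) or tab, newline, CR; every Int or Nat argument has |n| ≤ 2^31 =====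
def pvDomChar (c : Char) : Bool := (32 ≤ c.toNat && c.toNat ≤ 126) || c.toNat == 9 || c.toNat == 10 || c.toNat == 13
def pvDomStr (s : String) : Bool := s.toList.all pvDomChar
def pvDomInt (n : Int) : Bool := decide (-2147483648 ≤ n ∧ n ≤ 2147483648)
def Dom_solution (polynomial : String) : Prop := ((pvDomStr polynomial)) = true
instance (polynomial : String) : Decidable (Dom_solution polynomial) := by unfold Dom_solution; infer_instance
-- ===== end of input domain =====

-- B recovers the coefficients by interpolation (n = p(0), c = p(1) - p(0), via one uniform
-- term evaluator used at two points) and formats by parts-list join, instead of A's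
-- classifying accumulator loop and four-way branch cascade (objective: alternative, same cost).

-- ===== PORT A =====
-- literal transliteration of A; int(i) is ported as (ofStr? i).getD 0, exact under Pre_ (Python raises ValueError exactly where ofStr? is none)
def solution (polynomial : String) : String :=
  let tmp := PySem.Str.replace polynomial "+" ""
  let tmp := PySem.Str.split₀ tmp
  let st := tmp.foldl (fun (st : Int × Int) i =>
    if PySem.Str.isIn "x" i then
      if PySem.Str.len i = 1 then (st.1 + 1, st.2)
      else
        let i := PySem.Str.replace i "x" ""
        (st.1 + (PySem.Int.ofStr? i).getD 0, st.2)
    else (st.1, st.2 + (PySem.Int.ofStr? i).getD 0)) (0, 0)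
  let counter := st.1
  let num := st.2
  if counter = 0 then PySem.Int.toStr num
  else if num = 0 then
    if counter = 1 then "x" else PySem.Str.join "" [PySem.Int.toStr counter, "x"]
  else if counter = 1 then PySem.Str.join "" ["x + ", PySem.Int.toStr num]
  else PySem.Str.join "" [PySem.Int.toStr counter, "x + ", PySem.Int.toStr num]

-- ===== PORT B =====
def termValue (t : String) (x : Int) : Int :=
  if PySem.Str.isIn "x" t then
    (if PySem.Str.len t = 1 then 1
     else (PySem.Int.ofStr? (PySem.Str.replace t "x" "")).getD 0) * x
  else (PySem.Int.ofStr? t).getD 0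

def evalTokens (tokens : List String) (x : Int) : Int :=
  (tokens.map (fun t => termValue t x)).sum

def solution_alt (polynomial : String) : String :=
  let tokens := PySem.Str.split₀ (PySem.Str.replace polynomial "+" "")
  let p0 := evalTokens tokens 0
  let p1 := evalTokens tokens 1
  let c := p1 - p0
  let n := p0
  let parts : List String :=
    (if c ≠ 0 then [if c = 1 then "x" else PySem.Str.join "" [PySem.Int.toStr c, "x"]] else [])
    ++ (if n ≠ 0 ∨ c = 0 then [PySem.Int.toStr n] else [])
  PySem.Str.join " + " parts

-- ===== PRECONDITION & SPEC =====
-- Pre_ excludes exactly the inputs on which Python A raises ValueError: a token whose digits part is not int()-parsable.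
def Pre_solution (polynomial : String) : Prop :=
  ∀ t ∈ PySem.Str.split₀ (PySem.Str.replace polynomial "+" ""),
    if PySem.Str.isIn "x" t then
      PySem.Str.len t = 1 ∨ (PySem.Int.ofStr? (PySem.Str.replace t "x" "")).isSome = true
    else (PySem.Int.ofStr? t).isSome = true
instance (polynomial : String) : Decidable (Pre_solution polynomial) := by
  unfold Pre_solution; infer_instance

def pvWitness_solution : String := "3x + 7 + x"

def Spec_solution (polynomial : String) (out : String) : Prop := out = solution_alt polynomial
instance (polynomial : String) (out : String) : Decidable (Spec_solution polynomial out) := by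
  unfold Spec_solution; infer_instance

-- ===== CLAIM (what is proved, stated in full; the proofs are below) =====
def Claim_equal_solution : Prop := ∀ (polynomial : String), Dom_solution polynomial → Pre_solution polynomial → Spec_solution polynomial (solution polynomial)

-- ===== LEMMAS AND PROOFS =====

-- A's classifying accumulator equals B's two point-evaluations: first component is p(1) - p(0), second is p(0).
lemma parse_eq (l : List String) (a b : Int) :
    l.foldl (fun (st : Int × Int) i =>
      if PySem.Str.isIn "x" i then
        if PySem.Str.len i = 1 then (st.1 + 1, st.2)
        else
          let i := PySem.Str.replace i "x" ""
          (st.1 + (PySem.Int.ofStr? i).getD 0, st.2)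
      else (st.1, st.2 + (PySem.Int.ofStr? i).getD 0)) (a, b)
    = (a + (evalTokens l 1 - evalTokens l 0), b + evalTokens l 0) := by
  induction l generalizing a b with
  | nil => simp [evalTokens]
  | cons h t ih =>
    simp only [List.foldl_cons]
    by_cases hx : PySem.Str.isIn "x" h = true
    · by_cases hl : PySem.Str.len h = 1
      · rw [if_pos hx, if_pos hl, ih]
        simp only [evalTokens, List.map_cons, List.sum_cons, termValue, hx, hl, if_pos]
        ring_nf
      · rw [if_pos hx, if_neg hl]
        rw [show (let i := PySem.Str.replace h "x" "";
              ((a, b).1 + (PySem.Int.ofStr? i).getD 0, (a, b).2))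
            = (a + (PySem.Int.ofStr? (PySem.Str.replace h "x" "")).getD 0, b) from rfl, ih]
        simp only [evalTokens, List.map_cons, List.sum_cons, termValue, hx, hl, if_pos, if_false]
        ring_nf
    · rw [if_neg hx, ih]
      simp only [evalTokens, List.map_cons, List.sum_cons, termValue, hx, Bool.false_eq_true, if_false]
      ring_nf

-- ===== VERDICT (by name: the statement is the Claim_ definition above) =====
theorem solution_spec : Claim_equal_solution := by
  intro polynomial _ _
  unfold Spec_solution solution solution_alt
  simp only [parse_eq, zero_add]
  set toks := PySem.Str.split₀ (PySem.Str.replace polynomial "+" "") with htoks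
  set c := evalTokens toks 1 - evalTokens toks 0 with hc
  set n := evalTokens toks 0 with hn
  by_cases h0 : c = 0
  · simp [h0, PySem.Str.join, PySem.Chars.join, PySem.Int.toStr, List.intercalate]
  · by_cases hn0 : n = 0
    · by_cases h1 : c = 1 <;>
        simp [h0, hn0, h1, PySem.Str.join, PySem.Chars.join, PySem.Int.toStr,
          List.intercalate, List.intersperse]
    · by_cases h1 : c = 1 <;>
        simp [h0, hn0, h1, PySem.Str.join, PySem.Chars.join, PySem.Int.toStr,
          List.intercalate, List.intersperse]
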